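-- pv_equiv track=rewrite | github.com/James-Liebel/Personal_Projects | click typer/app/main.py | _last_n_words_span_len
-- ===== SOURCE A (Python) =====
-- def _last_n_words_span_len(typed_tokens, n_words):
--     """
--     Delete up to n_words from the end, respecting whitespace boundaries.
--     Returns (span_len, joined_str).
--     """
--     if not typed_tokens:
--         return 0, ""
--     i = len(typed_tokens) - 1
--     while i >= 0 and typed_tokens[i].isspace():
--         i -= 1
--     if i < 0:
--         return 0, ""
--     collected = []
--     words_found = 0
--     in_word = False
--     while i >= 0:
--         t = typed_tokens[i]
--         collected.append(t)
--         if t.isspace():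
--             if in_word:
--                 words_found += 1
--                 in_word = False
--                 if words_found >= n_words:
--                     break
--         else:
--             in_word = True
--         i -= 1
--     collected.reverse()
--     s = "".join(collected).rstrip()
--     return len(s), s
-- ===== SOURCE B (Python) =====
-- def _last_n_words_span_len(typed_tokens, n_words):
--     """
--     Delete up to n_words from the end, respecting whitespace boundaries.
--     Returns (span_len, joined_str).
--     Forward boundary-table version: one forward pass records the index of the
--     last non-space token and the positions of space tokens that immediately
--     precede a word ("completion" boundaries); the answer is a direct slice.
--     """
--     comps = []   # indices p with typed_tokens[p] space and typed_tokens[p+1] not space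
--     last = -1    # index of the last non-space token
--     for i, t in enumerate(typed_tokens):
--         if not t.isspace():
--             if i > 0 and typed_tokens[i - 1].isspace():
--                 comps.append(i - 1)
--             last = i
--     if last < 0:
--         return 0, ""
--     need = n_words if n_words > 1 else 1
--     start = comps[len(comps) - need] if need <= len(comps) else 0
--     s = "".join(typed_tokens[start:last + 1]).rstrip()
--     return len(s), s
-- ===== Notes on version B (the rewrite author's own statement) =====
-- stated objective: alternative
-- what changed: A walks the token list backwards with a word/space state machine that collects tokens until enough words are seen; B makes one forward pass that records the last non-space index and a table of space-before-word boundary positions, then returns a direct slice of the token list picked from that table.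
import Mathlib
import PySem

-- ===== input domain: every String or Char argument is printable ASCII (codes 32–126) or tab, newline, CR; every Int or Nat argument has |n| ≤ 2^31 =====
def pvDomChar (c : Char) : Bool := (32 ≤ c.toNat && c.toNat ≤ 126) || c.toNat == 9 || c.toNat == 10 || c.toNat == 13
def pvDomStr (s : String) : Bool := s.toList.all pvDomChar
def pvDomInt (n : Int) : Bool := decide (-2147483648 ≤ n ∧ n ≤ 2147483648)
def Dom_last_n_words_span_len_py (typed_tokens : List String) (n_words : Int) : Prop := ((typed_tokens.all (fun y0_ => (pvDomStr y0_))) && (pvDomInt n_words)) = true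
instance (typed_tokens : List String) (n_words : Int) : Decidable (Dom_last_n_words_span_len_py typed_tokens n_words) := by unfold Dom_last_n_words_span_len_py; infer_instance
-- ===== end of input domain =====

-- B replaces A's backward word/space state machine by a forward boundary-table pass plus a direct
-- slice (alternative decomposition, same asymptotic cost); equivalence is proved for all inputs.

-- ===== PORT A =====
-- the `while i >= 0 and typed_tokens[i].isspace(): i -= 1` loop; fuel j = i + 1
def pvSkipA (typed_tokens : List String) : Nat → Int
  | 0 => -1
  | j + 1 => if PySem.Str.strIsspace (typed_tokens.getD j "") then pvSkipA typed_tokens j else (j : Int)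

-- the main `while i >= 0` collect loop; fuel j = i + 1, state (collected, words_found, in_word)
def pvCollectA (typed_tokens : List String) (n_words : Int) :
    Nat → List String → Int → Bool → List String
  | 0, acc, _, _ => acc
  | j + 1, acc, wf, inW =>
    let t := typed_tokens.getD j ""
    let acc' := acc ++ [t]
    if PySem.Str.strIsspace t then
      if inW then
        if wf + 1 ≥ n_words then acc'
        else pvCollectA typed_tokens n_words j acc' (wf + 1) false
      else pvCollectA typed_tokens n_words j acc' wf false
    else pvCollectA typed_tokens n_words j acc' wf true

def last_n_words_span_len_py (typed_tokens : List String) (n_words : Int) : Int × String :=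
  if typed_tokens = [] then (0, "")
  else
    let i := pvSkipA typed_tokens typed_tokens.length
    if i < 0 then (0, "")
    else
      let collected := pvCollectA typed_tokens n_words (i.toNat + 1) [] 0 false
      let s := PySem.Str.rstrip (PySem.Str.join "" collected.reverse)
      (PySem.Str.len s, s)

-- ===== PORT B =====
def last_n_words_span_len_py_alt (typed_tokens : List String) (n_words : Int) : Int × String :=
  -- forward pass: comps = indices of space tokens immediately preceding a word; last = last non-space index
  let st := (PySem.List.enumerate typed_tokens 0).foldl
    (fun (st : List Int × Int) (p : Int × String) =>
      if ¬ PySem.Str.strIsspace p.2 then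
        ((if p.1 > 0 ∧ PySem.Str.strIsspace (PySem.List.pyGetD typed_tokens (p.1 - 1) "") then
            st.1 ++ [p.1 - 1] else st.1), p.1)
      else st) ([], -1)
  let comps := st.1
  let last := st.2
  if last < 0 then (0, "")
  else
    let need := if n_words > 1 then n_words else 1
    -- comps[len(comps) - need]: need ≥ 1 and need ≤ len(comps) here, so the index is in range
    let start : Int :=
      if need ≤ (comps.length : Int) then comps.getD ((comps.length : Int) - need).toNat 0 else 0
    let s := PySem.Str.rstrip
      (PySem.Str.join "" (PySem.List.slice typed_tokens (some start) (some (last + 1))))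
    (PySem.Str.len s, s)

-- ===== PRECONDITION & SPEC =====
def Spec_last_n_words_span_len_py (typed_tokens : List String) (n_words : Int) (out : Int × String) : Prop := out = last_n_words_span_len_py_alt typed_tokens n_words
instance (typed_tokens : List String) (n_words : Int) (out : Int × String) : Decidable (Spec_last_n_words_span_len_py typed_tokens n_words out) := by unfold Spec_last_n_words_span_len_py; infer_instance

-- ===== CLAIM (what is proved, stated in full; the proofs are below) =====
def Claim_equal_last_n_words_span_len_py : Prop := ∀ (typed_tokens : List String) (n_words : Int), Dom_last_n_words_span_len_py typed_tokens n_words → Spec_last_n_words_span_len_py typed_tokens n_words (last_n_words_span_len_py typed_tokens n_words)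

-- ===== LEMMAS AND PROOFS =====

-- abbreviation used only by the proofs
def pvSpc (t : String) : Bool := PySem.Str.strIsspace t

-- A's collect loop, rephrased structurally on the reversed processed segment
def pvCut : List String → Int → Bool → List String
  | [], _, _ => []
  | t :: r, m, inW =>
    if pvSpc t then
      if inW then
        if m ≤ 1 then [t] else t :: pvCut r (m - 1) false
      else t :: pvCut r m false
    else t :: pvCut r m true

-- number of elements pvCut does NOT take from its input
def pvD : List String → Int → Bool → Nat
  | [], _, _ => 0
  | t :: r, m, inW =>
    if pvSpc t then
      if inW then
        if m ≤ 1 then r.length else pvD r (m - 1) false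
      else pvD r m false
    else pvD r m true

-- completion boundaries of v given the incoming in-word flag w
def pvComps (v : List String) (w : Bool) : List Nat :=
  (List.range v.length).filter
    (fun p => pvSpc (v.getD p "") && (if p + 1 < v.length then !pvSpc (v.getD (p + 1) "") else w))

theorem pvSkipA_spec (ts : List String) (k : Nat) :
    pvSkipA ts k < (k : Int) ∧ (-1 ≤ pvSkipA ts k) ∧
    (∀ q : Nat, pvSkipA ts k < (q : Int) → q < k → pvSpc (ts.getD q "") = true) ∧
    (0 ≤ pvSkipA ts k → pvSpc (ts.getD (pvSkipA ts k).toNat "") = false) := by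
  induction k with
  | zero => refine ⟨by norm_num [pvSkipA], by norm_num [pvSkipA], ?_, by norm_num [pvSkipA]⟩
            intro q _ hq; omega
  | succ j ih =>
    by_cases h : PySem.Str.strIsspace (ts.getD j "") = true
    · have e : pvSkipA ts (j+1) = pvSkipA ts j := by simp only [pvSkipA, h, if_true]
      obtain ⟨h1, h2, h3, h4⟩ := ih
      refine ⟨by rw [e]; push_cast; omega, by rw [e]; exact h2, ?_, by rw [e]; exact h4⟩
      intro q hq hqk
      rw [e] at hq
      rcases Nat.lt_succ_iff_lt_or_eq.mp hqk with h' | h'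
      · exact h3 q hq h'
      · subst h'; simpa [pvSpc] using h
    · have e : pvSkipA ts (j+1) = (j : Int) := by simp only [pvSkipA, eq_false_of_ne_true h, Bool.false_eq_true, if_false]
      refine ⟨by rw [e]; omega, by rw [e]; omega, ?_, ?_⟩
      · intro q hq hqk; rw [e] at hq; exfalso; omega
      · intro _; rw [e]; simpa [pvSpc] using h

theorem pvCollectA_eq_cut (ts : List String) (n : Int) :
    ∀ (j : Nat), j ≤ ts.length → ∀ (acc : List String) (wf : Int) (inW : Bool),
      pvCollectA ts n j acc wf inW = acc ++ pvCut ((ts.take j).reverse) (n - wf) inW := by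
  intro j
  induction j with
  | zero => intro _ acc wf inW; simp [pvCollectA, pvCut]
  | succ j ih =>
    intro hj acc wf inW
    have hjl : j < ts.length := by omega
    have htake : (ts.take (j+1)).reverse = ts.getD j "" :: (ts.take j).reverse := by
      rw [List.take_add_one]
      simp [List.getD, hjl]
    rw [htake]
    by_cases h : pvSpc (ts.getD j "") = true
    · simp only [pvSpc, PySem.Str.strIsspace_eq, List.getD] at h
      by_cases hw : inW
      · subst hw
        by_cases hm : wf + 1 ≥ n
        · have hm' : n - wf ≤ 1 := by omega
          simp only [pvCollectA, pvCut]
          simp [pvSpc, PySem.Str.strIsspace_eq, List.getD, h, hm, hm']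
        · have hm' : ¬ (n - wf ≤ 1) := by omega
          have e1 : pvCollectA ts n (j+1) acc wf true
              = pvCollectA ts n j (acc ++ [ts.getD j ""]) (wf+1) false := by
            simp only [pvCollectA]
            simp [pvSpc, PySem.Str.strIsspace_eq, List.getD, h, hm]
          rw [e1, ih (by omega)]
          simp only [pvCut]
          have hx : n - (wf + 1) = n - wf - 1 := by ring
          simp [pvSpc, PySem.Str.strIsspace_eq, List.getD, h, hm', hx]
      · simp only [Bool.not_eq_true] at hw; subst hw
        have e1 : pvCollectA ts n (j+1) acc wf false
            = pvCollectA ts n j (acc ++ [ts.getD j ""]) wf false := by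
          simp only [pvCollectA]
          simp [pvSpc, PySem.Str.strIsspace_eq, List.getD, h]
        rw [e1, ih (by omega)]
        simp only [pvCut]
        simp [pvSpc, PySem.Str.strIsspace_eq, List.getD, h]
    · simp only [pvSpc, PySem.Str.strIsspace_eq, List.getD] at h
      have e1 : pvCollectA ts n (j+1) acc wf inW
          = pvCollectA ts n j (acc ++ [ts.getD j ""]) wf true := by
        simp only [pvCollectA]
        simp [pvSpc, PySem.Str.strIsspace_eq, List.getD, h]
      rw [e1, ih (by omega)]
      simp only [pvCut]
      simp [pvSpc, PySem.Str.strIsspace_eq, List.getD, h]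

theorem pvCut_take (l : List String) (m : Int) (w : Bool) :
    pvCut l m w = l.take (l.length - pvD l m w) ∧ pvD l m w ≤ l.length := by
  induction l generalizing m w with
  | nil => simp [pvCut, pvD]
  | cons t r ih =>
    by_cases h : pvSpc t = true
    · by_cases hw : w
      · subst hw
        by_cases hm : m ≤ 1
        · simp only [pvCut, pvD, h, hm, if_true, ite_true]
          constructor
          · have : r.length + 1 - r.length = 1 := by omega
            simp [List.length_cons, this]
          · simp only [List.length_cons]; omega
        · obtain ⟨e, hle⟩ := ih (m-1) false
          simp only [pvCut, pvD, h, hm, if_true, ite_true, if_false, ite_false]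
          constructor
          · rw [e]
            have : r.length + 1 - pvD r (m-1) false = (r.length - pvD r (m-1) false) + 1 := by omega
            simp [List.length_cons, this]
          · simp only [List.length_cons]; omega
      · simp only [Bool.not_eq_true] at hw; subst hw
        obtain ⟨e, hle⟩ := ih m false
        simp only [pvCut, pvD, h, if_true, ite_true, Bool.false_eq_true, if_false, ite_false]
        constructor
        · rw [e]
          have : r.length + 1 - pvD r m false = (r.length - pvD r m false) + 1 := by omega
          simp [List.length_cons, this]
        · simp only [List.length_cons]; omega
    · obtain ⟨e, hle⟩ := ih m true
      simp only [pvCut, pvD, eq_false_of_ne_true h, Bool.false_eq_true, if_false, ite_false]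
      constructor
      · rw [e]
        have : r.length + 1 - pvD r m true = (r.length - pvD r m true) + 1 := by omega
        simp [List.length_cons, this]
      · simp only [List.length_cons]; omega

theorem pvComps_append (v : List String) (t : String) (w : Bool) :
    pvComps (v ++ [t]) w = pvComps v (!pvSpc t) ++ (if pvSpc t && w then [v.length] else []) := by
  unfold pvComps
  have hl : (v ++ [t]).length = v.length + 1 := by simp
  rw [hl, List.range_succ, List.filter_append]
  congr 1
  · apply List.filter_congr
    intro p hp
    simp only [List.mem_range] at hp
    have g1 : (v ++ [t])[p]? = v[p]? := List.getElem?_append_left hp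
    by_cases h2 : p + 1 < v.length
    · have g2 : (v ++ [t])[p+1]? = v[p+1]? := List.getElem?_append_left h2
      have h6 : p + 1 < v.length + 1 := by omega
      simp [List.getD, g1, g2, h2, h6, hl]
    · have h4 : p + 1 = v.length := by omega
      have g2 : (v ++ [t])[p+1]? = some t := by
        rw [h4]; exact List.getElem?_concat_length
      have h6 : p + 1 < v.length + 1 := by omega
      have g3 : (v ++ [t])[p + 1]'(by simp; omega) = t := by
        apply Option.some.inj; rw [← List.getElem?_eq_getElem]; exact g2
      simp [List.getD, g1, h2, h6, hl, g3]
  · by_cases hs : pvSpc t = true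
    · by_cases hw : w
      · simp [hs, hw]
      · simp [hs, hw]
    · simp [eq_false_of_ne_true hs]

theorem pvD_eq_comps (v : List String) (m : Int) (w : Bool) :
    (pvD v.reverse m w : Int) =
      (if max m 1 ≤ ((pvComps v w).length : Int) then
        (((pvComps v w).getD ((pvComps v w).length - (max m 1).toNat) 0 : Nat) : Int)
      else 0) := by
  induction v using List.reverseRecOn generalizing m w with
  | nil => simp [pvD, pvComps]
  | append_singleton v t ih =>
    rw [List.reverse_append, List.reverse_singleton, List.singleton_append]
    rw [pvComps_append]
    by_cases hs : pvSpc t = true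
    · by_cases hw : w
      · subst hw
        by_cases hm : m ≤ 1
        · -- break: pvD = v.reverse.length = v.length; comps = C' ++ [v.length]
          have e : pvD (t :: v.reverse) m true = v.reverse.length := by
            simp [pvD, hs, hm]
          rw [e]
          have hmx : max m 1 = 1 := by omega
          have hrw : pvComps v (!pvSpc t) ++ (if pvSpc t && true then [v.length] else [])
              = pvComps v false ++ [v.length] := by simp [hs]
          rw [hrw]
          set C := pvComps v false with hC
          have hlen : (C ++ [v.length]).length = C.length + 1 := by simp
          rw [hlen]
          have hcond : max m 1 ≤ ((C.length + 1 : Nat) : Int) := by rw [hmx]; push_cast; omega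
          rw [if_pos hcond, hmx]
          have : C.length + 1 - (1:Int).toNat = C.length := by simp
          rw [this]
          have : (C ++ [v.length]).getD C.length 0 = v.length := by simp [List.getD]
          rw [this]
          simp
        · -- continue with m-1, state false
          have e : pvD (t :: v.reverse) m true = pvD v.reverse (m-1) false := by
            simp [pvD, hs, hm]
          rw [e, ih]
          have hrw : pvComps v (!pvSpc t) ++ (if pvSpc t && true then [v.length] else [])
              = pvComps v false ++ [v.length] := by simp [hs]
          rw [hrw]
          set C := pvComps v false with hC
          have hlen : (C ++ [v.length]).length = C.length + 1 := by simp
          rw [hlen]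
          have hmx : max (m-1) 1 = m - 1 := by omega
          have hmx2 : max m 1 = m := by omega
          by_cases hc : (m - 1) ≤ (C.length : Int)
          · rw [if_pos (by rw [hmx]; exact hc)]
            rw [if_pos (by rw [hmx2]; push_cast; omega)]
            rw [hmx, hmx2]
            have hidx : C.length + 1 - m.toNat = C.length - (m-1).toNat := by omega
            rw [hidx]
            have hlt : C.length - (m-1).toNat < C.length := by omega
            rw [List.getD, List.getD, List.getElem?_append_left hlt]
          · rw [if_neg (by rw [hmx]; exact hc)]
            rw [if_neg (by rw [hmx2]; push_cast; omega)]
      · simp only [Bool.not_eq_true] at hw; subst hw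
        have e : pvD (t :: v.reverse) m false = pvD v.reverse m false := by
          simp [pvD, hs]
        rw [e, ih]
        have hrw : pvComps v (!pvSpc t) ++ (if pvSpc t && false then [v.length] else [])
            = pvComps v false := by simp [hs]
        rw [hrw]
    · have e : pvD (t :: v.reverse) m w = pvD v.reverse m true := by
        simp [pvD, eq_false_of_ne_true hs]
      rw [e, ih]
      have hrw : pvComps v (!pvSpc t) ++ (if pvSpc t && w then [v.length] else [])
          = pvComps v true := by simp [eq_false_of_ne_true hs]
      rw [hrw]

theorem pvEnumAppend {α : Type} (xs : List α) (x : α) (s : Int) :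
    PySem.List.enumerate (xs ++ [x]) s = PySem.List.enumerate xs s ++ [(s + xs.length, x)] := by
  induction xs generalizing s with
  | nil => simp [PySem.List.enumerate_nil, PySem.List.enumerate_cons]
  | cons y ys ih =>
    simp [PySem.List.enumerate_cons, ih (s + 1)]
    ring_nf

theorem pvFoldB (ts : List String) (k : Nat) (hk : k ≤ ts.length) :
    ((PySem.List.enumerate (ts.take k) 0).foldl
      (fun (st : List Int × Int) (p : Int × String) =>
        if ¬ PySem.Str.strIsspace p.2 then
          ((if p.1 > 0 ∧ PySem.Str.strIsspace (PySem.List.pyGetD ts (p.1 - 1) "") then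
              st.1 ++ [p.1 - 1] else st.1), p.1)
        else st) ([], -1)) =
    (List.map (fun (q : Nat) => (q : Int) - 1)
      ((List.range k).filter
        (fun q => !pvSpc (ts.getD q "") && decide (0 < q) && pvSpc (ts.getD (q - 1) ""))),
     pvSkipA ts k) := by
  induction k with
  | zero => simp [PySem.List.enumerate_nil, pvSkipA]
  | succ k ih =>
    have hkl : k < ts.length := by omega
    have htake : ts.take (k+1) = ts.take k ++ [ts.getD k ""] := by
      rw [List.take_add_one]
      simp [List.getD, hkl]
    rw [htake, pvEnumAppend, List.foldl_append, ih (by omega)]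
    have hlen : ((ts.take k).length : Int) = (k : Int) := by
      simp [List.length_take]; omega
    simp only [List.foldl_cons, List.foldl_nil, hlen, zero_add]
    rw [List.range_succ, List.filter_append, List.map_append]
    by_cases hs : pvSpc (ts.getD k "") = true
    · -- space token: fold state unchanged; filter drops k
      have h2 : (List.filter
          (fun q => !pvSpc (ts.getD q "") && decide (0 < q) && pvSpc (ts.getD (q - 1) "")) [k]) = [] := by
        have hs2 := hs
        simp only [List.getD] at hs2
        simp [hs2]
      have h3 : pvSkipA ts (k+1) = pvSkipA ts k := by
        simp only [pvSkipA]
        simp [pvSpc] at hs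
        simp [hs]
      have hsS : PySem.Str.strIsspace (ts.getD k "") = true := hs
      rw [if_neg (not_not_intro hsS), h2, h3]
      simp
    · have hs' : pvSpc (ts.getD k "") = false := eq_false_of_ne_true hs
      have hns : ¬ (PySem.Str.strIsspace (ts.getD k "") = true) := by
        intro h; exact absurd (hs'.symm.trans h) (by simp)
      have h3 : pvSkipA ts (k+1) = (k : Int) := by
        simp only [pvSkipA]
        simp [pvSpc] at hs'
        simp [hs']
      rw [if_pos hns, h3]
      by_cases hc : 0 < k ∧ pvSpc (ts.getD (k - 1) "") = true
      · obtain ⟨hc1, hc2⟩ := hc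
        have e1 : ((k : Int) > 0 ∧ PySem.Str.strIsspace (PySem.List.pyGetD ts ((k : Int) - 1) "") = true) := by
          constructor
          · exact_mod_cast hc1
          · have hcast : ((k : Int) - 1) = ((k - 1 : Nat) : Int) := by omega
            rw [hcast, PySem.List.pyGetD_natCast]
            simpa [pvSpc] using hc2
        have h2 : (List.filter
            (fun q => !pvSpc (ts.getD q "") && decide (0 < q) && pvSpc (ts.getD (q - 1) "")) [k]) = [k] := by
          have hs2 := hs'
          have hc3 := hc2
          simp only [List.getD] at hs2 hc3
          simp [hs2, hc1, hc3]
        rw [if_pos e1, h2]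
        simp
      · have e1 : ¬ ((k : Int) > 0 ∧ PySem.Str.strIsspace (PySem.List.pyGetD ts ((k : Int) - 1) "") = true) := by
          intro ⟨a, b⟩
          apply hc
          have ha : 0 < k := by exact_mod_cast a
          refine ⟨ha, ?_⟩
          have hcast : ((k : Int) - 1) = ((k - 1 : Nat) : Int) := by omega
          rw [hcast, PySem.List.pyGetD_natCast] at b
          simpa [pvSpc] using b
        have h2 : (List.filter
            (fun q => !pvSpc (ts.getD q "") && decide (0 < q) && pvSpc (ts.getD (q - 1) "")) [k]) = [] := by
          by_cases hk0 : 0 < k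
          · have hf : pvSpc (ts.getD (k - 1) "") = false := by
              rcases Bool.eq_false_or_eq_true (pvSpc (ts.getD (k - 1) "")) with h | h
              · exact absurd ⟨hk0, h⟩ hc
              · exact h
            have hf2 := hf
            simp only [List.getD] at hf2
            simp [hf2]
          · simp [Nat.le_zero.mp (Nat.not_lt.mp hk0)]
        rw [if_neg e1, h2]
        simp

theorem pvFilterRangeShrink (g : Nat → Bool) (a b : Nat) (hab : a ≤ b)
    (h : ∀ q, a ≤ q → q < b → g q = false) :
    (List.range b).filter g = (List.range a).filter g := by
  induction b with
  | zero => have : a = 0 := by omega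
            subst this; rfl
  | succ b ih =>
    by_cases hb : a = b + 1
    · subst hb; rfl
    · have hab' : a ≤ b := by omega
      rw [List.range_succ, List.filter_append]
      have : List.filter g [b] = [] := by simp [h b hab' (by omega)]
      rw [this, List.append_nil, ih hab' (fun q h1 h2 => h q h1 (by omega))]

theorem pvFilterRangeShift (g : Nat → Bool) (h0 : g 0 = false) (M : Nat) :
    (List.range (M + 1)).filter g = ((List.range M).filter (fun q => g (q + 1))).map (· + 1) := by
  induction M with
  | zero => simp [h0]
  | succ M ih =>
    rw [List.range_succ, List.filter_append, ih]
    conv_rhs => rw [List.range_succ, List.filter_append, List.map_append]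
    congr 1
    by_cases hg : g (M + 1) = true
    · simp [hg]
    · simp [eq_false_of_ne_true hg]


-- ===== VERDICT (by name: the statement is the Claim_ definition above) =====
theorem last_n_words_span_len_py_spec : Claim_equal_last_n_words_span_len_py := by
  intro ts n _
  unfold Spec_last_n_words_span_len_py
  unfold last_n_words_span_len_py last_n_words_span_len_py_alt
  by_cases hnil : ts = []
  · subst hnil
    simp [PySem.List.enumerate_nil]
  · rw [if_neg hnil]
    obtain ⟨hlt, hge, habove, hat⟩ := pvSkipA_spec ts ts.length
    have hfold := pvFoldB ts ts.length (le_refl _)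
    rw [List.take_length] at hfold
    simp only [hfold]
    by_cases hneg : pvSkipA ts ts.length < 0
    · rw [if_pos hneg, if_pos hneg]
    · rw [if_neg hneg, if_neg hneg]
      set i := pvSkipA ts ts.length with hi
      have h0i : 0 ≤ i := by omega
      have hilen : (i : Int) < (ts.length : Int) := hlt
      set M := i.toNat with hM
      have hiM : i = (M : Int) := by omega
      have hM1 : M + 1 ≤ ts.length := by omega
      -- A's collected list
      rw [pvCollectA_eq_cut ts n (M + 1) hM1 [] 0 false]
      set u := ts.take (M + 1) with hu
      have hulen : u.length = M + 1 := by simp [hu]; omega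
      obtain ⟨hcut, hdle⟩ := pvCut_take u.reverse (n - 0) false
      rw [List.length_reverse, hulen] at hdle
      set d := pvD u.reverse (n - 0) false with hd
      -- collected.reverse = u.drop d
      have hcoll : (pvCut u.reverse (n - 0) false).reverse = u.drop d := by
        rw [hcut, List.length_reverse, hulen]
        rw [List.take_reverse, List.reverse_reverse, hulen]
        congr 1
        omega
      -- the boundary table of B equals pvComps u false (cast to Int)
      have hgetDtake : ∀ q : Nat, q < M + 1 → u.getD q "" = ts.getD q "" := by
        intro q hq
        simp [hu, List.getD, hq]
      have hC : List.map (fun (q : Nat) => (q : Int) - 1)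
          ((List.range ts.length).filter
            (fun q => !pvSpc (ts.getD q "") && decide (0 < q) && pvSpc (ts.getD (q - 1) ""))) =
          (pvComps u false).map (fun p : Nat => (p : Int)) := by
        have hS1 : (List.range ts.length).filter
              (fun q => !pvSpc (ts.getD q "") && decide (0 < q) && pvSpc (ts.getD (q - 1) "")) =
            (List.range (M + 1)).filter
              (fun q => !pvSpc (ts.getD q "") && decide (0 < q) && pvSpc (ts.getD (q - 1) "")) := by
          apply pvFilterRangeShrink _ _ _ hM1
          intro q h1 h2
          have hsp : pvSpc (ts.getD q "") = true := habove q (by omega) h2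
          rw [hsp]
          rfl
        have hS2 : (List.range (M + 1)).filter
              (fun q => !pvSpc (ts.getD q "") && decide (0 < q) && pvSpc (ts.getD (q - 1) "")) =
            ((List.range M).filter
              (fun q => !pvSpc (ts.getD (q + 1) "") && decide (0 < q + 1) && pvSpc (ts.getD (q + 1 - 1) ""))).map (· + 1) := by
          exact pvFilterRangeShift _ (by simp) M
        have hCdef : pvComps u false = (List.range (M + 1)).filter
            (fun p => pvSpc (u.getD p "") && (if p + 1 < M + 1 then !pvSpc (u.getD (p + 1) "") else false)) := by
          unfold pvComps
          rw [hulen]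
        have hCM : pvComps u false = (List.range M).filter
            (fun p => pvSpc (u.getD p "") && (if p + 1 < M + 1 then !pvSpc (u.getD (p + 1) "") else false)) := by
          rw [hCdef]
          apply pvFilterRangeShrink _ _ _ (by omega)
          intro q h1 h2
          have hq : q = M := by omega
          subst hq
          have hns : pvSpc (u.getD M "") = false := by
            rw [hgetDtake M (by omega)]
            exact hat h0i
          rw [hns]
          rfl
        have hpt : (List.range M).filter
              (fun p => pvSpc (u.getD p "") && (if p + 1 < M + 1 then !pvSpc (u.getD (p + 1) "") else false)) =
            (List.range M).filter
              (fun q => !pvSpc (ts.getD (q + 1) "") && decide (0 < q + 1) && pvSpc (ts.getD (q + 1 - 1) "")) := by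
          apply List.filter_congr
          intro q hq
          simp only [List.mem_range] at hq
          rw [hgetDtake q (by omega), hgetDtake (q + 1) (by omega)]
          have h1 : (q + 1 < M + 1) = True := by simp; omega
          simp only [h1, if_true, Nat.add_sub_cancel]
          cases pvSpc (ts.getD q "") <;> cases pvSpc (ts.getD (q + 1) "") <;> simp
        rw [hS1, hS2, hCM, hpt, List.map_map]
        apply List.map_congr_left
        intro q _
        simp
      rw [hC]
      set C := pvComps u false with hCC
      have hdc := pvD_eq_comps u (n - 0) false
      rw [← hCC] at hdc
      have hneed : (if n > 1 then n else 1) = max (n - 0) 1 := by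
        split_ifs with h <;> omega
      rw [hneed, List.length_map]
      have hcoll2 : ([] ++ pvCut u.reverse (n - 0) false).reverse = List.drop d u := by
        rw [List.nil_append]; exact hcoll
      rw [hcoll2]
      by_cases hcnd : max (n - 0) 1 ≤ ((C.length : Nat) : Int)
      · rw [if_pos hcnd]
        rw [if_pos hcnd] at hdc
        have hC1 : 1 ≤ C.length := by omega
        have hidx : (((C.length : Nat) : Int) - max (n - 0) 1).toNat = C.length - (max (n - 0) 1).toNat := by
          omega
        rw [hidx]
        have hjlt : C.length - (max (n - 0) 1).toNat < C.length := by omega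
        have hgd : (List.map (fun p : Nat => (p : Int)) C).getD (C.length - (max (n - 0) 1).toNat) 0
            = ((C.getD (C.length - (max (n - 0) 1).toNat) 0 : Nat) : Int) := by
          simp only [List.getD, List.getElem?_map]
          rw [List.getElem?_eq_getElem hjlt]
          simp
        rw [hgd, ← hdc]
        have hi1 : i + 1 = ((M + 1 : Nat) : Int) := by omega
        have hdcast : ((d : Nat) : Int) = ((d : Nat) : Int) := rfl
        rw [hi1, PySem.List.slice_natCast]
        rw [hu, List.drop_take]
      · rw [if_neg hcnd]
        rw [if_neg hcnd] at hdc
        have hd0 : d = 0 := by omega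
        rw [← hdc]
        have hi1 : i + 1 = ((M + 1 : Nat) : Int) := by omega
        rw [hi1, PySem.List.slice_natCast]
        rw [hu, List.drop_take]
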